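-- pv_equiv track=rewrite | github.com/kaefcatcher/wifi_lib | phy/bcc.py | bcc_encoder
-- ===== SOURCE A (Python) =====
-- from typing import List
--
-- def bcc_encoder(data: List[int], code_rate: str = "1/2") -> List[int]:
--     """
--     Perform BCC encoding based on the IEEE 802.11n standard.
--
--     Parameters:
--     - data (List[int]): The data bits to be encoded.
--     - code_rate (str): The coding rate. Supported values: "1/2", "2/3", "3/4", "5/6".
--
--     Returns:
--     - List[int]: The encoded bits after applying the puncturing pattern.
--     """
--
--     g1 = 0b1111001
--     g0 = 0b1011011
--     shift_register = [0] * 7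
--     raw_encoded_bits = []
--
--     puncturing_patterns = {
--         "1/2": [1, 1],
--         "2/3": [1, 1, 1, 0],
--         "3/4": [1, 1, 1, 0, 0, 1],
--         "5/6": [1, 1, 1, 0, 0, 1, 1, 0, 1, 0]
--     }
--     pattern = puncturing_patterns.get(code_rate, [1, 1])
--     pattern_len = len(pattern)
--
--     for bit in data:
--         shift_register = [bit] + shift_register[:-1]
--
--         encoded_bit_0 = sum([shift_register[i]
--                             for i in range(7) if (g0 >> i) & 1]) % 2
--         encoded_bit_1 = sum([shift_register[i]
--                             for i in range(7) if (g1 >> i) & 1]) % 2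
--
--         raw_encoded_bits.extend([encoded_bit_0, encoded_bit_1])
--
--     encoded_bits = [bit for i, bit in enumerate(
--         raw_encoded_bits) if pattern[i % pattern_len] == 1]
--
--     return encoded_bits
-- ===== SOURCE B (Python) =====
-- from typing import List
--
-- # Table-driven FSM: a 128-entry output table (built once with a bitwise XOR-fold
-- # parity trick), an integer bitmask as the encoder state, and puncturing applied
-- # inline with a running output index -- no shift-register list, no per-bit
-- # comprehensions, no intermediate raw-bit list.
--
-- def _parity(x: int) -> int:
--     x ^= x >> 4
--     x ^= x >> 2
--     x ^= x >> 1
--     return x & 1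
--
-- _TABLE = [(_parity(s & 0b1011011), _parity(s & 0b1111001)) for s in range(128)]
--
-- def bcc_encoder(data: List[int], code_rate: str = "1/2") -> List[int]:
--     puncturing_patterns = {
--         "1/2": [1, 1],
--         "2/3": [1, 1, 1, 0],
--         "3/4": [1, 1, 1, 0, 0, 1],
--         "5/6": [1, 1, 1, 0, 0, 1, 1, 0, 1, 0]
--     }
--     pattern = puncturing_patterns.get(code_rate, [1, 1])
--     plen = len(pattern)
--
--     out = []
--     state = 0
--     idx = 0
--     for bit in data:
--         state = ((state << 1) & 0x7F) | (bit % 2)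
--         e0, e1 = _TABLE[state]
--         if pattern[idx % plen] == 1:
--             out.append(e0)
--         idx += 1
--         if pattern[idx % plen] == 1:
--             out.append(e1)
--         idx += 1
--     return out
-- ===== Notes on version B (the rewrite author's own statement) =====
-- stated objective: faster
-- what changed: Replaces the per-bit list shift register, the two filtered range(7) comprehensions, the full raw-bit list and the separate enumerate/filter puncturing pass by a table-driven finite-state machine: a 128-entry output table precomputed once via an XOR-fold parity trick, an integer bitmask state, and inline puncturing with a running output index.
import Mathlib
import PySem

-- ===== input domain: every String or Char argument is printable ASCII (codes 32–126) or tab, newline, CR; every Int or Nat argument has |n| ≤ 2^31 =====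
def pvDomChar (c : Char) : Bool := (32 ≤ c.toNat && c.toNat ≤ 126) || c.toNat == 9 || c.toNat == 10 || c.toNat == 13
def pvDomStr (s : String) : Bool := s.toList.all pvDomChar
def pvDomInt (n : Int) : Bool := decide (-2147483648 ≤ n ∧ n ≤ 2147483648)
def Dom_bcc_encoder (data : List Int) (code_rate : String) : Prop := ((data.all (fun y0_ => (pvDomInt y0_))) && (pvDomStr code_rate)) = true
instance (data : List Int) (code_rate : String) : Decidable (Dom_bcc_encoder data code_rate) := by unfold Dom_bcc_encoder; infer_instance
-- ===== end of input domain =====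

-- B replaces A's shift-register list, per-bit comprehensions and build-then-filter puncturing
-- by a table-driven FSM (128-entry precomputed output table, integer bitmask state, inline
-- puncturing with a running output index); same asymptotic cost, different mechanism.

-- ===== PORT A =====
-- the literal dict of puncturing patterns (appears verbatim in both Pythons)
def pvPatternsA : PySem.Dict String (List Int) :=
  PySem.Dict.ofList [("1/2", [1, 1]), ("2/3", [1, 1, 1, 0]),
                     ("3/4", [1, 1, 1, 0, 0, 1]), ("5/6", [1, 1, 1, 0, 0, 1, 1, 0, 1, 0])]

-- sum([shift_register[i] for i in range(7) if (g >> i) & 1]) % 2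
def pvEncBitA (g : Nat) (reg : List Int) : Int :=
  PySem.Int.mod ((((List.range 7).filter (fun i => (g >>> i) &&& 1 == 1)).map
    (fun i => PySem.List.pyGetD reg (i : Int) 0)).sum) 2

-- the 'for bit in data' loop, producing raw_encoded_bits
def pvLoopA : List Int → List Int → List Int
  | _, [] => []
  | reg, bit :: rest =>
      let reg' := bit :: PySem.List.slice reg none (some (-1))
      pvEncBitA 91 reg' :: pvEncBitA 121 reg' :: pvLoopA reg' rest

def bcc_encoder (data : List Int) (code_rate : String) : List Int :=
  let pattern := PySem.Dict.getD pvPatternsA code_rate [1, 1]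
  let plen : Int := pattern.length
  let raw := pvLoopA (List.replicate 7 0) data
  ((PySem.List.enumerate raw 0).filter
      (fun q => PySem.List.pyGetD pattern (PySem.Int.mod q.1 plen) 0 == 1)).map (·.2)

-- ===== PORT B =====
def pvPatternsB : PySem.Dict String (List Int) :=
  PySem.Dict.ofList [("1/2", [1, 1]), ("2/3", [1, 1, 1, 0]),
                     ("3/4", [1, 1, 1, 0, 0, 1]), ("5/6", [1, 1, 1, 0, 0, 1, 1, 0, 1, 0])]

-- _parity: x ^= x >> 4; x ^= x >> 2; x ^= x >> 1; return x & 1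
-- (arguments are the nonnegative ints s & g < 128, so Nat ^^^/>>>/&&& are exact here)
def pvParity (x : Nat) : Nat :=
  let x1 := x ^^^ (x >>> 4)
  let x2 := x1 ^^^ (x1 >>> 2)
  let x3 := x2 ^^^ (x2 >>> 1)
  x3 &&& 1

-- _TABLE = [(_parity(s & 0b1011011), _parity(s & 0b1111001)) for s in range(128)]
-- (range(128) yields the nonnegative ints 0..127; ported over Nat, exact)
def pvTable : List (Int × Int) :=
  (List.range 128).map (fun s => ((pvParity (s &&& 91) : Int), (pvParity (s &&& 121) : Int)))

-- the 'for bit in data' loop of B: state is a nonnegative int < 128 (ported as Nat;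
-- Python's << & | on nonnegative ints coincide with the Nat operations), idx the
-- running output index, out the accumulator.  bit % 2 → PySem.Int.mod bit 2 ∈ {0,1}.
def pvLoopB (pattern : List Int) (plen : Int) : Nat → Int → List Int → List Int → List Int
  | _, _, out, [] => out
  | state, idx, out, bit :: rest =>
      let state' := ((state <<< 1) &&& 127) ||| (PySem.Int.mod bit 2).toNat
      let e := PySem.List.pyGetD pvTable (state' : Int) (0, 0)
      let out1 := if PySem.List.pyGetD pattern (PySem.Int.mod idx plen) 0 == 1
                  then out ++ [e.1] else out
      let out2 := if PySem.List.pyGetD pattern (PySem.Int.mod (idx + 1) plen) 0 == 1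
                  then out1 ++ [e.2] else out1
      pvLoopB pattern plen state' (idx + 2) out2 rest

def bcc_encoder_alt (data : List Int) (code_rate : String) : List Int :=
  let pattern := PySem.Dict.getD pvPatternsB code_rate [1, 1]
  let plen : Int := pattern.length
  pvLoopB pattern plen 0 0 [] data

-- ===== PRECONDITION & SPEC =====
def Spec_bcc_encoder (data : List Int) (code_rate : String) (out : List Int) : Prop := out = bcc_encoder_alt data code_rate
instance (data : List Int) (code_rate : String) (out : List Int) : Decidable (Spec_bcc_encoder data code_rate out) := by unfold Spec_bcc_encoder; infer_instance

-- ===== CLAIM (what is proved, stated in full; the proofs are below) =====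
def Claim_equal_bcc_encoder : Prop := ∀ (data : List Int) (code_rate : String), Dom_bcc_encoder data code_rate → Spec_bcc_encoder data code_rate (bcc_encoder data code_rate)

-- ===== LEMMAS AND PROOFS =====

-- the stream of input parities, padded with six zeros: pvP[t+6] = parity of data[t]
def pvP (data : List Int) : List Int :=
  List.replicate 6 0 ++ data.map (fun d => PySem.Int.mod d 2)

-- the two encoded bits of step t, read from the parity array
def pvE0 (p : List Int) (t : Nat) : Int :=
  PySem.Int.mod (p.getD (t + 6) 0 + p.getD (t + 5) 0 + p.getD (t + 3) 0
                 + p.getD (t + 2) 0 + p.getD t 0) 2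
def pvE1 (p : List Int) (t : Nat) : Int :=
  PySem.Int.mod (p.getD (t + 6) 0 + p.getD (t + 3) 0 + p.getD (t + 2) 0
                 + p.getD (t + 1) 0 + p.getD t 0) 2

-- the raw encoded bits from step t on, n steps
def pvRaw (p : List Int) (t : Nat) : Nat → List Int
  | 0 => []
  | n + 1 => pvE0 p t :: pvE1 p t :: pvRaw p (t + 1) n

-- puncturing filter with a running output index
def pvFilt (pattern : List Int) (plen : Int) : Int → List Int → List Int
  | _, [] => []
  | k, x :: xs =>
      (if PySem.List.pyGetD pattern (PySem.Int.mod k plen) 0 == 1 then [x] else [])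
        ++ pvFilt pattern plen (k + 1) xs

theorem pvTaps0 : (List.range 7).filter (fun i => ((91:Nat) >>> i) &&& 1 == 1) = [0,1,3,4,6] := by decide
theorem pvTaps1 : (List.range 7).filter (fun i => ((121:Nat) >>> i) &&& 1 == 1) = [0,3,4,5,6] := by decide

theorem pvEncBitA0 (x0 x1 x2 x3 x4 x5 x6 : Int) :
    pvEncBitA 91 [x0, x1, x2, x3, x4, x5, x6] = PySem.Int.mod (x0 + x1 + x3 + x4 + x6) 2 := by
  rw [pvEncBitA, pvTaps0]
  norm_num [PySem.List.pyGetD, PySem.List.pyIdx?, PySem.List.pyGet?]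
  norm_num [show Int.toNat 3 = 3 from rfl, show Int.toNat 4 = 4 from rfl, show Int.toNat 6 = 6 from rfl]
  ring_nf

theorem pvEncBitA1 (x0 x1 x2 x3 x4 x5 x6 : Int) :
    pvEncBitA 121 [x0, x1, x2, x3, x4, x5, x6] = PySem.Int.mod (x0 + x3 + x4 + x5 + x6) 2 := by
  rw [pvEncBitA, pvTaps1]
  norm_num [PySem.List.pyGetD, PySem.List.pyIdx?, PySem.List.pyGet?]
  norm_num [show Int.toNat 3 = 3 from rfl, show Int.toNat 4 = 4 from rfl,
            show Int.toNat 5 = 5 from rfl, show Int.toNat 6 = 6 from rfl]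
  ring_nf

-- p entries: zeros in front, parities after
theorem pvP_lt_six (data : List Int) (i : Nat) (h : i < 6) : (pvP data).getD i 0 = 0 := by
  rw [pvP, List.getD_append _ _ _ _ (by simpa using h)]
  interval_cases i <;> rfl

theorem pvP_parity (data : List Int) (t : Nat) (b : Int) (hb : data[t]? = some b) :
    (pvP data).getD (t + 6) 0 = PySem.Int.mod b 2 := by
  rw [pvP, List.getD_append_right _ _ _ _ (by simp)]
  simp [List.getD_eq_getElem?_getD, hb]

-- every entry of pvP is 0 or 1
theorem pvP_mem (data : List Int) (j : Nat) :
    (pvP data).getD j 0 = 0 ∨ (pvP data).getD j 0 = 1 := by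
  rw [List.getD_eq_getElem?_getD]
  cases h : (pvP data)[j]? with
  | none => simp
  | some v =>
    have hv : v ∈ pvP data := List.mem_of_getElem? h
    rw [pvP] at hv
    rcases List.mem_append.mp hv with h1 | h2
    · left; simpa using (List.eq_of_mem_replicate h1) ▸ rfl
    · rcases List.mem_map.mp h2 with ⟨d, _, rfl⟩
      rw [PySem.Int.mod_eq_emod_of_pos (by norm_num)]
      have h1 := Int.emod_nonneg d (show (2:Int) ≠ 0 by norm_num)
      have h2 := Int.emod_lt_of_pos d (show (0:Int) < 2 by norm_num)
      simp only [Option.getD_some]; omega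

-- mod-2 of a 5-term sum only depends on the summands mod 2
theorem pvModSum (a b c d e : Int) :
    PySem.Int.mod (a + b + c + d + e) 2 =
      PySem.Int.mod (PySem.Int.mod a 2 + PySem.Int.mod b 2 + PySem.Int.mod c 2
                     + PySem.Int.mod d 2 + PySem.Int.mod e 2) 2 := by
  simp only [PySem.Int.mod_eq_emod_of_pos (show (0:Int) < 2 by norm_num)]
  omega

-- A's loop computes pvRaw, given the register invariant
theorem pvLoopA_eq (data : List Int) :
    ∀ (rest : List Int) (t : Nat) (reg : List Int),
      data.drop t = rest → reg.length = 7 →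
      (∀ i : Nat, i < 7 → PySem.Int.mod (reg.getD i 0) 2 = (pvP data).getD (t + 5 - i) 0) →
      pvLoopA reg rest = pvRaw (pvP data) t rest.length := by
  intro rest
  induction rest with
  | nil => intro t reg _ _ _; simp [pvLoopA, pvRaw]
  | cons b rest' ih =>
    intro t reg hdrop hlen hinv
    have hb : data[t]? = some b := by
      have h : (data.drop t)[0]? = data[t + 0]? := List.getElem?_drop
      rw [hdrop] at h; simpa using h.symm
    have hdrop' : data.drop (t + 1) = rest' := by
      have h : data.drop (t + 1) = (data.drop t).drop 1 := by rw [List.drop_drop]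
      rw [h, hdrop]; rfl
    match reg, hlen with
    | [r0, r1, r2, r3, r4, r5, r6], _ =>
      have hsl : PySem.List.slice [r0, r1, r2, r3, r4, r5, r6] none (some (-1))
          = [r0, r1, r2, r3, r4, r5] := by
        rw [PySem.List.slice_to_neg_one]; rfl
      have hpb := pvP_parity data t b hb
      have h0 : PySem.Int.mod r0 2 = (pvP data).getD (t + 5) 0 := hinv 0 (by norm_num)
      have h1 : PySem.Int.mod r1 2 = (pvP data).getD (t + 4) 0 := hinv 1 (by norm_num)
      have h2 : PySem.Int.mod r2 2 = (pvP data).getD (t + 3) 0 := hinv 2 (by norm_num)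
      have h3 : PySem.Int.mod r3 2 = (pvP data).getD (t + 2) 0 := hinv 3 (by norm_num)
      have h4 : PySem.Int.mod r4 2 = (pvP data).getD (t + 1) 0 := hinv 4 (by norm_num)
      have h5 : PySem.Int.mod r5 2 = (pvP data).getD t 0 := hinv 5 (by norm_num)
      have he0 : pvEncBitA 91 [b, r0, r1, r2, r3, r4, r5] = pvE0 (pvP data) t := by
        rw [pvEncBitA0, pvE0, hpb, ← h0, ← h2, ← h3, ← h5]
        exact pvModSum b r0 r2 r3 r5
      have he1 : pvEncBitA 121 [b, r0, r1, r2, r3, r4, r5] = pvE1 (pvP data) t := by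
        rw [pvEncBitA1, pvE1, hpb, ← h2, ← h3, ← h4, ← h5]
        exact pvModSum b r2 r3 r4 r5
      have hinv' : ∀ i : Nat, i < 7 →
          PySem.Int.mod (([b, r0, r1, r2, r3, r4, r5] : List Int).getD i 0) 2
            = (pvP data).getD (t + 1 + 5 - i) 0 := by
        intro i hi
        interval_cases i
        · exact hpb.symm
        · exact h0
        · exact h1
        · exact h2
        · exact h3
        · exact h4
        · exact h5
      show pvLoopA [r0, r1, r2, r3, r4, r5, r6] (b :: rest')
          = pvRaw (pvP data) t (rest'.length + 1)
      rw [pvLoopA, pvRaw]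
      simp only [hsl]
      rw [he0, he1, ih (t + 1) [b, r0, r1, r2, r3, r4, r5] hdrop' rfl hinv']

-- A's enumerate/filter/comprehension equals the running-index filter
theorem pvEnumFilt (pattern : List Int) (plen : Int) :
    ∀ (raw : List Int) (s : Int),
      ((PySem.List.enumerate raw s).filter
          (fun q => PySem.List.pyGetD pattern (PySem.Int.mod q.1 plen) 0 == 1)).map (·.2)
        = pvFilt pattern plen s raw := by
  intro raw
  induction raw with
  | nil => intro s; simp [PySem.List.enumerate_nil, pvFilt]
  | cons x xs ih =>
    intro s
    rw [PySem.List.enumerate_cons, pvFilt]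
    by_cases h : PySem.List.pyGetD pattern (PySem.Int.mod s plen) 0 == 1 <;>
      simp [h, ih]

-- B side: pvPb j = parity at position j of the padded stream, as a Nat
def pvPb (data : List Int) (j : Nat) : Nat := ((pvP data).getD j 0).toNat

-- the FSM state after t input bits, as a 7-bit integer (bit i = pvPb (t+5-i))
def pvS (data : List Int) (t : Nat) : Nat :=
  pvPb data (t + 5) + 2 * pvPb data (t + 4) + 4 * pvPb data (t + 3) + 8 * pvPb data (t + 2)
    + 16 * pvPb data (t + 1) + 32 * pvPb data t + 64 * pvPb data (t - 1)

theorem pvPb_le (data : List Int) (j : Nat) : pvPb data j ≤ 1 := by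
  rcases pvP_mem data j with h | h <;> rw [pvPb, h] <;> norm_num

theorem pvPb_cast (data : List Int) (j : Nat) :
    ((pvPb data j : Nat) : Int) = (pvP data).getD j 0 := by
  rcases pvP_mem data j with h | h <;> rw [pvPb, h] <;> rfl

theorem pvS_zero (data : List Int) : pvS data 0 = 0 := by
  have h : ∀ i : Nat, i < 6 → pvPb data i = 0 := by
    intro i hi; rw [pvPb, pvP_lt_six data i hi]; rfl
  simp [pvS, h 5 (by norm_num), h 4 (by norm_num), h 3 (by norm_num),
        h 2 (by norm_num), h 1 (by norm_num), h 0 (by norm_num)]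

-- the shift/mask/or step on a 7-bit state, by exhaustive check
theorem pvShiftOr : ∀ (s : Fin 128) (p : Fin 2),
    ((s.val <<< 1) &&& 127) ||| p.val = (2 * s.val) % 128 + p.val := by decide

theorem pvStep (data : List Int) (t : Nat) :
    ((pvS data t <<< 1) &&& 127) ||| pvPb data (t + 6) = pvS data (t + 1) := by
  have b0 := pvPb_le data (t + 6); have b1 := pvPb_le data (t + 5)
  have b2 := pvPb_le data (t + 4); have b3 := pvPb_le data (t + 3)
  have b4 := pvPb_le data (t + 2); have b5 := pvPb_le data (t + 1)
  have b6 := pvPb_le data t; have b7 := pvPb_le data (t - 1)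
  have hS : pvS data t < 128 := by rw [pvS]; omega
  have hp : pvPb data (t + 6) < 2 := by omega
  have h := pvShiftOr ⟨pvS data t, hS⟩ ⟨pvPb data (t + 6), hp⟩
  simp only at h
  have hexp0 : pvS data t
      = pvPb data (t + 5) + 2 * pvPb data (t + 4) + 4 * pvPb data (t + 3)
        + 8 * pvPb data (t + 2) + 16 * pvPb data (t + 1) + 32 * pvPb data t
        + 64 * pvPb data (t - 1) := rfl
  have hexp1 : pvS data (t + 1)
      = pvPb data (t + 6) + 2 * pvPb data (t + 5) + 4 * pvPb data (t + 4)
        + 8 * pvPb data (t + 3) + 16 * pvPb data (t + 2) + 32 * pvPb data (t + 1)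
        + 64 * pvPb data t := by
    simp [pvS, show t + 1 + 5 = t + 6 from by omega, show t + 1 + 4 = t + 5 from by omega,
          show t + 1 + 3 = t + 4 from by omega, show t + 1 + 2 = t + 3 from by omega,
          show t + 1 + 1 = t + 2 from by omega]
  omega

-- the table lookup at a 7-bit state returns the two tap parities, by exhaustive check
set_option maxRecDepth 4000 in
theorem pvTable_lookup : ∀ b0 b1 b2 b3 b4 b5 b6 : Fin 2,
    PySem.List.pyGetD pvTable
      (((b0.val + 2 * b1.val + 4 * b2.val + 8 * b3.val + 16 * b4.val + 32 * b5.val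
          + 64 * b6.val : Nat) : Int)) (0, 0)
    = (PySem.Int.mod ((b0.val : Int) + b1.val + b3.val + b4.val + b6.val) 2,
       PySem.Int.mod ((b0.val : Int) + b3.val + b4.val + b5.val + b6.val) 2) := by decide

theorem pvLookup (data : List Int) (t : Nat) :
    PySem.List.pyGetD pvTable ((pvS data (t + 1) : Nat) : Int) (0, 0)
      = (pvE0 (pvP data) t, pvE1 (pvP data) t) := by
  have h := pvTable_lookup
    ⟨pvPb data (t + 6), by have := pvPb_le data (t + 6); omega⟩
    ⟨pvPb data (t + 5), by have := pvPb_le data (t + 5); omega⟩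
    ⟨pvPb data (t + 4), by have := pvPb_le data (t + 4); omega⟩
    ⟨pvPb data (t + 3), by have := pvPb_le data (t + 3); omega⟩
    ⟨pvPb data (t + 2), by have := pvPb_le data (t + 2); omega⟩
    ⟨pvPb data (t + 1), by have := pvPb_le data (t + 1); omega⟩
    ⟨pvPb data t, by have := pvPb_le data t; omega⟩
  simp only at h
  have hidx : pvS data (t + 1)
      = pvPb data (t + 6) + 2 * pvPb data (t + 5) + 4 * pvPb data (t + 4)
        + 8 * pvPb data (t + 3) + 16 * pvPb data (t + 2) + 32 * pvPb data (t + 1)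
        + 64 * pvPb data t := by
    simp [pvS, show t + 1 + 5 = t + 6 from by omega, show t + 1 + 4 = t + 5 from by omega,
          show t + 1 + 3 = t + 4 from by omega, show t + 1 + 2 = t + 3 from by omega,
          show t + 1 + 1 = t + 2 from by omega]
  rw [hidx, h, pvE0, pvE1,
      ← pvPb_cast data (t + 6), ← pvPb_cast data (t + 5),
      ← pvPb_cast data (t + 3), ← pvPb_cast data (t + 2), ← pvPb_cast data (t + 1),
      ← pvPb_cast data t]

-- B's loop equals the filtered pvRaw
theorem pvLoopB_eq (data pattern : List Int) (plen : Int) :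
    ∀ (rest : List Int) (t : Nat) (out : List Int),
      data.drop t = rest →
      pvLoopB pattern plen (pvS data t) (2 * (t : Int)) out rest
        = out ++ pvFilt pattern plen (2 * (t : Int)) (pvRaw (pvP data) t rest.length) := by
  intro rest
  induction rest with
  | nil => intro t out _; simp [pvLoopB, pvRaw, pvFilt]
  | cons bit rest' ih =>
    intro t out hdrop
    have hb : data[t]? = some bit := by
      have h : (data.drop t)[0]? = data[t + 0]? := List.getElem?_drop
      rw [hdrop] at h; simpa using h.symm
    have hdrop' : data.drop (t + 1) = rest' := by
      have h : data.drop (t + 1) = (data.drop t).drop 1 := by rw [List.drop_drop]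
      rw [h, hdrop]; rfl
    have hpar : (PySem.Int.mod bit 2).toNat = pvPb data (t + 6) := by
      rw [pvPb, pvP_parity data t bit hb]
    rw [pvLoopB]
    simp only [hpar, pvStep data t, pvLookup data t]
    have hidx2 : 2 * (t : Int) + 2 = 2 * (((t + 1 : Nat) : Int)) := by push_cast; ring
    have hidx2' : 2 * (t : Int) + 1 + 1 = 2 * (((t + 1 : Nat) : Int)) := by push_cast; ring
    rw [hidx2, ih (t + 1) _ hdrop']
    simp only [List.length_cons]
    rw [pvRaw, pvFilt, pvFilt, hidx2']
    by_cases hc0 : PySem.List.pyGetD pattern (PySem.Int.mod (2 * (t : Int)) plen) 0 == 1 <;>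
      by_cases hc1 : PySem.List.pyGetD pattern (PySem.Int.mod (2 * (t : Int) + 1) plen) 0 == 1 <;>
        simp [hc0, hc1, List.append_assoc]

-- ===== VERDICT (by name: the statement is the Claim_ definition above) =====
theorem bcc_encoder_spec : Claim_equal_bcc_encoder := by
  intro data code_rate _
  unfold Spec_bcc_encoder bcc_encoder bcc_encoder_alt
  dsimp only
  rw [show pvPatternsB = pvPatternsA from rfl, pvEnumFilt]
  have hA : pvLoopA (List.replicate 7 0) data = pvRaw (pvP data) 0 data.length := by
    have h := pvLoopA_eq data data 0 (List.replicate 7 0) (by simp) (by simp) ?_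
    · simpa using h
    · intro i hi
      have hz : (List.replicate 7 (0 : Int)).getD i 0 = 0 := by
        interval_cases i <;> rfl
      rw [hz, show PySem.Int.mod 0 2 = 0 from rfl, pvP_lt_six data _ (by omega)]
  have hB := pvLoopB_eq data (PySem.Dict.getD pvPatternsA code_rate [1, 1])
      ((PySem.Dict.getD pvPatternsA code_rate [1, 1]).length : Int) data 0 [] (by simp)
  simp only [pvS_zero, Nat.cast_zero, mul_zero, List.nil_append] at hB
  rw [hA, hB]
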